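-- pv_equiv track=rewrite | github.com/HuyaneMatsu/scarletio | scarletio/utils/trace/expression_parsing/parsing.py | _try_parse_triple_quote_from_behind
-- ===== SOURCE A (Python) =====
-- ACTION_TYPE_NONE = 0
--
-- ACTION_TYPE_STRING_OPEN_TRIPLE_SINGLE_QUOTE = 9
--
-- ACTION_TYPE_STRING_OPEN_TRIPLE_DOUBLE_QUOTE = 10
--
-- ACTION_TYPE_STRING_CLOSE_TRIPLE_SINGLE_QUOTE = 13
--
-- ACTION_TYPE_STRING_CLOSE_TRIPLE_DOUBLE_QUOTE = 14
--
-- def _try_parse_triple_quote_from_behind(line, source_action):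
--     """
--     Tries to parse a triple quoted string from behind returning the where it started and whether it was closed.
--
--     Parameters
--     ----------
--     line : `str`
--         Line to parse.
--     source_action : `int`
--         The last action executed.
--
--     Returns
--     -------
--     length : `int`
--     action : `int`
--     """
--     if source_action == ACTION_TYPE_STRING_OPEN_TRIPLE_SINGLE_QUOTE:
--         end_character = '\''
--         closer_action = ACTION_TYPE_STRING_CLOSE_TRIPLE_SINGLE_QUOTE
--     elif source_action == ACTION_TYPE_STRING_OPEN_TRIPLE_DOUBLE_QUOTE:
--         end_character = '"'
--         closer_action = ACTION_TYPE_STRING_CLOSE_TRIPLE_DOUBLE_QUOTE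
--     else:
--         return len(line), ACTION_TYPE_NONE
--
--     for index in range(2, len(line)):
--         if line[index] != end_character:
--             continue
--
--         if line[index - 1] != end_character:
--             continue
--
--         if line[index - 2] != end_character:
--             continue
--
--         if index - 3 >= 0 and line[index - 3] == '\\':
--             continue
--
--         return index - 2, closer_action
--
--     return 0, ACTION_TYPE_NONE
-- ===== SOURCE B (Python) =====
-- ACTION_TYPE_NONE = 0
-- ACTION_TYPE_STRING_OPEN_TRIPLE_SINGLE_QUOTE = 9
-- ACTION_TYPE_STRING_OPEN_TRIPLE_DOUBLE_QUOTE = 10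
-- ACTION_TYPE_STRING_CLOSE_TRIPLE_SINGLE_QUOTE = 13
-- ACTION_TYPE_STRING_CLOSE_TRIPLE_DOUBLE_QUOTE = 14
--
-- def _try_parse_triple_quote_from_behind(line, source_action):
--     if source_action == ACTION_TYPE_STRING_OPEN_TRIPLE_SINGLE_QUOTE:
--         end_character = '\''
--         closer_action = ACTION_TYPE_STRING_CLOSE_TRIPLE_SINGLE_QUOTE
--     elif source_action == ACTION_TYPE_STRING_OPEN_TRIPLE_DOUBLE_QUOTE:
--         end_character = '"'
--         closer_action = ACTION_TYPE_STRING_CLOSE_TRIPLE_DOUBLE_QUOTE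
--     else:
--         return len(line), ACTION_TYPE_NONE
--
--     # Stage 1: run-length encode the maximal runs of the end character.
--     runs = []
--     start = None
--     for index, character in enumerate(line):
--         if character == end_character:
--             if start is None:
--                 start = index
--         else:
--             if start is not None:
--                 runs.append((start, index - start))
--                 start = None
--     if start is not None:
--         runs.append((start, len(line) - start))
--
--     # Stage 2: the first run of length >= 3 closes the string, at its start if
--     # not escaped, else one position later (the preceding quote cannot be an
--     # escape) provided the run still holds three quotes.
--     for start, length in runs:
--         if length >= 3:
--             if start == 0 or line[start - 1] != '\\':
--                 return start, closer_action
--             if length >= 4: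
--                 return start + 1, closer_action
--     return 0, ACTION_TYPE_NONE
-- ===== Notes on version B (the rewrite author's own statement) =====
-- stated objective: alternative
-- what changed: Replaces A's single scan with three per-index lookbacks and an escape lookback by a staged algorithm: first run-length encode the maximal runs of the end character, then decide from the first run of length >= 3 (its start if unescaped, start+1 if escaped and the run has >= 4 quotes).
import Mathlib
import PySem

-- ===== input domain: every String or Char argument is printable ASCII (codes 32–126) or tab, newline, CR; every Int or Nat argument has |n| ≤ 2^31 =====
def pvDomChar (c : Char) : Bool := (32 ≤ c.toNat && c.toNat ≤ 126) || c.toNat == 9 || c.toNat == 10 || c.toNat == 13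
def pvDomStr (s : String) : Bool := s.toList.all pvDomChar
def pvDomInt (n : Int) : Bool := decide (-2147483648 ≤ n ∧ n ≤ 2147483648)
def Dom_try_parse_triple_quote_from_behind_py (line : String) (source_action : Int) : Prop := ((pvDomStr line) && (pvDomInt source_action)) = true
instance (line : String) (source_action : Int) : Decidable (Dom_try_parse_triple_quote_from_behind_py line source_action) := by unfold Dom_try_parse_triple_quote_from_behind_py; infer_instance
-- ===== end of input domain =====

-- ===== PORT A =====
-- B replaces A's single scan with per-index lookback by two stages: run-length
-- encode the maximal runs of the end character, then pick the first run of
-- length >= 3 (alternative decomposition, same cost).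
def pvLoopA (cs : List Char) (q : Char) (closer : Int) (index : Nat) : Int × Int :=
  if _h : index < cs.length then
    if cs.getD index ' ' ≠ q then pvLoopA cs q closer (index + 1)
    else if cs.getD (index - 1) ' ' ≠ q then pvLoopA cs q closer (index + 1)
    else if cs.getD (index - 2) ' ' ≠ q then pvLoopA cs q closer (index + 1)
    else if 3 ≤ index ∧ cs.getD (index - 3) ' ' = '\\' then pvLoopA cs q closer (index + 1)
    else ((index : Int) - 2, closer)
  else (0, 0)
termination_by cs.length - index

def try_parse_triple_quote_from_behind_py (line : String) (source_action : Int) : Int × Int :=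
  if source_action = 9 then pvLoopA line.toList '\'' 13 2
  else if source_action = 10 then pvLoopA line.toList '"' 14 2
  else ((line.toList.length : Int), 0)

-- ===== PORT B =====
-- Stage 1 of B: run-length encode the maximal runs of `q` in `cs`
-- (`start` = start of the currently open run, `acc` = runs emitted so far).
def pvRunsGo (cs : List Char) (q : Char) (i : Nat) (start : Option Nat) (acc : List (Nat × Nat)) : List (Nat × Nat) :=
  if _h : i < cs.length then
    if cs.getD i ' ' = q then
      match start with
      | none => pvRunsGo cs q (i + 1) (some i) acc
      | some s => pvRunsGo cs q (i + 1) (some s) acc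
    else
      match start with
      | none => pvRunsGo cs q (i + 1) none acc
      | some s => pvRunsGo cs q (i + 1) none (acc ++ [(s, i - s)])
  else
    match start with
    | none => acc
    | some s => acc ++ [(s, cs.length - s)]
termination_by cs.length - i

-- Stage 2 of B: first run of length >= 3 decides the result.
def pvScanRuns (cs : List Char) (closer : Int) : List (Nat × Nat) → Int × Int
  | [] => (0, 0)
  | (s, len) :: rest =>
    if 3 ≤ len then
      if s = 0 ∨ cs.getD (s - 1) ' ' ≠ '\\' then ((s : Int), closer)
      else if 4 ≤ len then ((s : Int) + 1, closer)
      else pvScanRuns cs closer rest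
    else pvScanRuns cs closer rest

def try_parse_triple_quote_from_behind_py_alt (line : String) (source_action : Int) : Int × Int :=
  if source_action = 9 then pvScanRuns line.toList 13 (pvRunsGo line.toList '\'' 0 none [])
  else if source_action = 10 then pvScanRuns line.toList 14 (pvRunsGo line.toList '"' 0 none [])
  else ((line.toList.length : Int), 0)

-- ===== PRECONDITION & SPEC =====
def Spec_try_parse_triple_quote_from_behind_py (line : String) (source_action : Int) (out : Int × Int) : Prop := out = try_parse_triple_quote_from_behind_py_alt line source_action
instance (line : String) (source_action : Int) (out : Int × Int) : Decidable (Spec_try_parse_triple_quote_from_behind_py line source_action out) := by unfold Spec_try_parse_triple_quote_from_behind_py; infer_instance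

-- ===== CLAIM (what is proved, stated in full; the proofs are below) =====
def Claim_equal_try_parse_triple_quote_from_behind_py : Prop := ∀ (line : String) (source_action : Int), Dom_try_parse_triple_quote_from_behind_py line source_action → Spec_try_parse_triple_quote_from_behind_py line source_action (try_parse_triple_quote_from_behind_py line source_action)

-- ===== LEMMAS AND PROOFS =====

/-- Reference function: the first start `s` carrying an unescaped triple quote. -/
def pvFirst (cs : List Char) (q : Char) (closer : Int) (s : Nat) : Int × Int :=
  if _h : s + 2 < cs.length then
    if cs.getD s ' ' = q ∧ cs.getD (s + 1) ' ' = q ∧ cs.getD (s + 2) ' ' = q ∧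
        (s = 0 ∨ cs.getD (s - 1) ' ' ≠ '\\') then ((s : Int), closer)
    else pvFirst cs q closer (s + 1)
  else (0, 0)
termination_by cs.length - s

theorem pvFirst_oob (cs : List Char) (q : Char) (closer : Int) (s : Nat)
    (h : cs.length ≤ s + 2) : pvFirst cs q closer s = (0, 0) := by
  rw [pvFirst, dif_neg (by omega)]

theorem pvFirst_skip (cs : List Char) (q : Char) (closer : Int) (s : Nat)
    (h : ¬ (cs.getD s ' ' = q ∧ cs.getD (s + 1) ' ' = q ∧ cs.getD (s + 2) ' ' = q ∧
        (s = 0 ∨ cs.getD (s - 1) ' ' ≠ '\\'))) :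
    pvFirst cs q closer s = pvFirst cs q closer (s + 1) := by
  by_cases hr : s + 2 < cs.length
  · rw [pvFirst, dif_pos hr, if_neg h]
  · rw [pvFirst_oob cs q closer s (by omega), pvFirst_oob cs q closer (s + 1) (by omega)]

/-- Skip from `t` up past `i` when `cs[i] ≠ q` and `i ≤ t + 2`. -/
theorem pvFirst_skip_to (cs : List Char) (q : Char) (closer : Int) (i : Nat)
    (hq : cs.getD i ' ' ≠ q) :
    ∀ k t, i + 1 - t ≤ k → t ≤ i → i ≤ t + 2 →
      pvFirst cs q closer t = pvFirst cs q closer (i + 1) := by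
  intro k
  induction k with
  | zero => intro t h1 h2 _; omega
  | succ n ih =>
    intro t h1 h2 h3
    have hstep : pvFirst cs q closer t = pvFirst cs q closer (t + 1) := by
      apply pvFirst_skip
      rintro ⟨c0, c1, c2, -⟩
      have : i = t ∨ i = t + 1 ∨ i = t + 2 := by omega
      rcases this with rfl | rfl | rfl
      · exact hq c0
      · exact hq c1
      · exact hq c2
    rw [hstep]
    by_cases he : t = i
    · subst he; rfl
    · exact ih (t + 1) (by omega) (by omega) (by omega)

theorem pvLoopA_eq_pvFirst (cs : List Char) (q : Char) (closer : Int) :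
    ∀ n s, cs.length - s ≤ n → pvLoopA cs q closer (s + 2) = pvFirst cs q closer s := by
  intro n
  induction n with
  | zero =>
    intro s h
    rw [pvLoopA, dif_neg (by omega), pvFirst_oob cs q closer s (by omega)]
  | succ n ih =>
    intro s h
    by_cases hr : s + 2 < cs.length
    · rw [pvLoopA, dif_pos hr, pvFirst, dif_pos hr]
      have hrec : pvLoopA cs q closer (s + 2 + 1) = pvFirst cs q closer (s + 1) := ih (s + 1) (by omega)
      have e0 : s + 2 - 2 = s := by omega
      have e1 : s + 2 - 1 = s + 1 := by omega
      have e3 : s + 2 - 3 = s - 1 := by omega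
      rw [e0, e1, e3]
      by_cases c2 : cs.getD (s + 2) ' ' = q
      · rw [if_neg (not_not_intro c2)]
        by_cases c1 : cs.getD (s + 1) ' ' = q
        · rw [if_neg (not_not_intro c1)]
          by_cases c0 : cs.getD s ' ' = q
          · rw [if_neg (not_not_intro c0)]
            by_cases hesc : 3 ≤ s + 2 ∧ cs.getD (s - 1) ' ' = '\\'
            · rw [if_pos hesc, if_neg ?_]
              · exact hrec
              · rintro ⟨-, -, -, h0 | hne⟩
                · omega
                · exact hne hesc.2
            · have hor : s = 0 ∨ cs.getD (s - 1) ' ' ≠ '\\' := by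
                by_cases h0 : s = 0
                · exact Or.inl h0
                · exact Or.inr (fun hb => hesc ⟨by omega, hb⟩)
              rw [if_neg hesc, if_pos ⟨c0, c1, c2, hor⟩]
              norm_num [Prod.ext_iff]
          · rw [if_pos c0, if_neg (by tauto)]; exact hrec
        · rw [if_pos c1, if_neg (by tauto)]; exact hrec
      · rw [if_pos c2, if_neg (by tauto)]; exact hrec
    · rw [pvLoopA, dif_neg (by omega), pvFirst_oob cs q closer s (by omega)]

-- unfolding lemmas for `pvRunsGo` (its body is a `match`, so `rw [pvRunsGo]` fails)
theorem runsGo_none_lt_q (cs : List Char) (q : Char) (i : Nat) (acc : List (Nat × Nat))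
    (hr : i < cs.length) (hc : cs.getD i ' ' = q) :
    pvRunsGo cs q i none acc = pvRunsGo cs q (i + 1) (some i) acc := by
  have hc' : cs[i]'hr = q := by rwa [List.getD_eq_getElem cs ' ' hr] at hc
  rw [pvRunsGo.eq_def]; simp [hr, hc']

theorem runsGo_some_lt_q (cs : List Char) (q : Char) (i s : Nat) (acc : List (Nat × Nat))
    (hr : i < cs.length) (hc : cs.getD i ' ' = q) :
    pvRunsGo cs q i (some s) acc = pvRunsGo cs q (i + 1) (some s) acc := by
  have hc' : cs[i]'hr = q := by rwa [List.getD_eq_getElem cs ' ' hr] at hc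
  rw [pvRunsGo.eq_def]; simp [hr, hc']

theorem runsGo_none_lt_nq (cs : List Char) (q : Char) (i : Nat) (acc : List (Nat × Nat))
    (hr : i < cs.length) (hc : ¬ cs.getD i ' ' = q) :
    pvRunsGo cs q i none acc = pvRunsGo cs q (i + 1) none acc := by
  have hc' : ¬ cs[i]'hr = q := by rwa [List.getD_eq_getElem cs ' ' hr] at hc
  rw [pvRunsGo.eq_def]; simp [hr, hc']

theorem runsGo_some_lt_nq (cs : List Char) (q : Char) (i s : Nat) (acc : List (Nat × Nat))
    (hr : i < cs.length) (hc : ¬ cs.getD i ' ' = q) :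
    pvRunsGo cs q i (some s) acc = pvRunsGo cs q (i + 1) none (acc ++ [(s, i - s)]) := by
  have hc' : ¬ cs[i]'hr = q := by rwa [List.getD_eq_getElem cs ' ' hr] at hc
  rw [pvRunsGo.eq_def]; simp [hr, hc']

theorem runsGo_none_ge (cs : List Char) (q : Char) (i : Nat) (acc : List (Nat × Nat))
    (hr : ¬ i < cs.length) :
    pvRunsGo cs q i none acc = acc := by
  rw [pvRunsGo.eq_def]; simp [hr]

theorem runsGo_some_ge (cs : List Char) (q : Char) (i s : Nat) (acc : List (Nat × Nat))
    (hr : ¬ i < cs.length) :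
    pvRunsGo cs q i (some s) acc = acc ++ [(s, cs.length - s)] := by
  rw [pvRunsGo.eq_def]; simp [hr]

theorem pvRunsGo_acc (cs : List Char) (q : Char) :
    ∀ n i start acc, cs.length - i ≤ n →
      pvRunsGo cs q i start acc = acc ++ pvRunsGo cs q i start [] := by
  intro n
  induction n with
  | zero =>
    intro i start acc h
    cases start with
    | none => rw [runsGo_none_ge cs q i acc (by omega), runsGo_none_ge cs q i [] (by omega)]; simp
    | some s => rw [runsGo_some_ge cs q i s acc (by omega), runsGo_some_ge cs q i s [] (by omega)]; simp
  | succ n ih =>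
    intro i start acc h
    by_cases hr : i < cs.length
    · by_cases hc : cs.getD i ' ' = q
      · cases start with
        | none =>
          rw [runsGo_none_lt_q cs q i acc hr hc, runsGo_none_lt_q cs q i [] hr hc,
            ih (i + 1) (some i) acc (by omega)]
        | some s =>
          rw [runsGo_some_lt_q cs q i s acc hr hc, runsGo_some_lt_q cs q i s [] hr hc,
            ih (i + 1) (some s) acc (by omega)]
      · cases start with
        | none =>
          rw [runsGo_none_lt_nq cs q i acc hr hc, runsGo_none_lt_nq cs q i [] hr hc,
            ih (i + 1) none acc (by omega)]
        | some s =>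
          rw [runsGo_some_lt_nq cs q i s acc hr hc, runsGo_some_lt_nq cs q i s [] hr hc,
            ih (i + 1) none (acc ++ [(s, i - s)]) (by omega),
            ih (i + 1) none ([] ++ [(s, i - s)]) (by omega)]
          simp
    · cases start with
      | none => rw [runsGo_none_ge cs q i acc hr, runsGo_none_ge cs q i [] hr]; simp
      | some s => rw [runsGo_some_ge cs q i s acc hr, runsGo_some_ge cs q i s [] hr]; simp

/-- Scanning a single run `(s, L)` (followed by `rest`) against `pvFirst s`:
    all positions `s .. s+L-1` hold `q`, the run ends at `i = s + L`. -/
theorem pvScan_run (cs : List Char) (q : Char) (closer : Int) (hq : q ≠ '\\')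
    (s L : Nat) (hL : 1 ≤ L) (hrun : ∀ j, s ≤ j → j < s + L → cs.getD j ' ' = q)
    (hlen : s + L ≤ cs.length) (rest : List (Nat × Nat))
    (hrest : pvScanRuns cs closer rest = pvFirst cs q closer (s + L + 1))
    (hend : cs.getD (s + L) ' ' ≠ q ∨ s + L = cs.length) :
    pvScanRuns cs closer ((s, L) :: rest) = pvFirst cs q closer s := by
  have hq0 : cs.getD s ' ' = q := hrun s (by omega) (by omega)
  rw [pvScanRuns]
  by_cases h3 : 3 ≤ L
  · rw [if_pos h3]
    by_cases hesc : s = 0 ∨ cs.getD (s - 1) ' ' ≠ '\\'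
    · rw [if_pos hesc, pvFirst, dif_pos (by omega),
        if_pos ⟨hq0, hrun (s + 1) (by omega) (by omega), hrun (s + 2) (by omega) (by omega), hesc⟩]
    · rw [if_neg hesc]
      have hstep : pvFirst cs q closer s = pvFirst cs q closer (s + 1) :=
        pvFirst_skip cs q closer s (by tauto)
      by_cases h4 : 4 ≤ L
      · rw [if_pos h4, hstep, pvFirst, dif_pos (by omega),
          if_pos ⟨hrun (s + 1) (by omega) (by omega), hrun (s + 2) (by omega) (by omega),
            hrun (s + 3) (by omega) (by omega),
            Or.inr (by rw [show s + 1 - 1 = s by omega, hq0]; exact hq)⟩]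
        norm_num
      · -- L = 3, escaped: no hit in this run
        rw [if_neg h4, hrest, hstep]
        rcases hend with hne | heq
        · exact (pvFirst_skip_to cs q closer (s + L) hne (s + L + 1) (s + 1)
            (by omega) (by omega) (by omega)).symm
        · rw [pvFirst_oob cs q closer (s + 1) (by omega),
            pvFirst_oob cs q closer (s + L + 1) (by omega)]
  · -- short run, L ∈ {1, 2}: no triple fits
    rw [if_neg h3, hrest]
    rcases hend with hne | heq
    · exact (pvFirst_skip_to cs q closer (s + L) hne (s + L + 1) s
        (by omega) (by omega) (by omega)).symm
    · rw [pvFirst_oob cs q closer s (by omega), pvFirst_oob cs q closer (s + L + 1) (by omega)]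

theorem pvB_main (cs : List Char) (q : Char) (closer : Int) (hq : q ≠ '\\') :
    ∀ n i start, cs.length - i ≤ n → i ≤ cs.length →
      (match start with
       | none => pvScanRuns cs closer (pvRunsGo cs q i none []) = pvFirst cs q closer i
       | some s => s < i → (∀ j, s ≤ j → j < i → cs.getD j ' ' = q) →
           pvScanRuns cs closer (pvRunsGo cs q i (some s) []) = pvFirst cs q closer s) := by
  intro n
  induction n with
  | zero =>
    intro i start hn hle
    cases start with
    | none =>
      show pvScanRuns cs closer (pvRunsGo cs q i none []) = pvFirst cs q closer i
      rw [runsGo_none_ge cs q i [] (by omega), pvScanRuns, pvFirst_oob cs q closer i (by omega)]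
    | some s =>
      intro hsi hrun
      rw [runsGo_some_ge cs q i s [] (by omega)]
      simp only [List.nil_append]
      have hi : i = cs.length := by omega
      subst hi
      exact pvScan_run cs q closer hq s (cs.length - s) (by omega)
        (by intro j h1 h2; exact hrun j h1 (by omega)) (by omega) []
        (by rw [pvScanRuns, pvFirst_oob cs q closer (s + (cs.length - s) + 1) (by omega)])
        (Or.inr (by omega))
  | succ n ih =>
    intro i start hn hle
    by_cases hr : i < cs.length
    · cases start with
      | none =>
        show pvScanRuns cs closer (pvRunsGo cs q i none []) = pvFirst cs q closer i
        by_cases hc : cs.getD i ' ' = q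
        · rw [runsGo_none_lt_q cs q i [] hr hc]
          have hrec : (i : Nat) < i + 1 → (∀ j, i ≤ j → j < i + 1 → cs.getD j ' ' = q) →
              pvScanRuns cs closer (pvRunsGo cs q (i + 1) (some i) []) = pvFirst cs q closer i :=
            ih (i + 1) (some i) (by omega) (by omega)
          exact hrec (by omega) (by intro j h1 h2; rw [show j = i by omega]; exact hc)
        · rw [runsGo_none_lt_nq cs q i [] hr hc]
          have hrec : pvScanRuns cs closer (pvRunsGo cs q (i + 1) none []) = pvFirst cs q closer (i + 1) :=
            ih (i + 1) none (by omega) (by omega)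
          rw [hrec]
          exact (pvFirst_skip_to cs q closer i hc (i + 2) i (by omega) (by omega) (by omega)).symm
      | some s =>
        intro hsi hrun
        by_cases hc : cs.getD i ' ' = q
        · rw [runsGo_some_lt_q cs q i s [] hr hc]
          have hrec : (s : Nat) < i + 1 → (∀ j, s ≤ j → j < i + 1 → cs.getD j ' ' = q) →
              pvScanRuns cs closer (pvRunsGo cs q (i + 1) (some s) []) = pvFirst cs q closer s :=
            ih (i + 1) (some s) (by omega) (by omega)
          refine hrec (by omega) ?_
          intro j h1 h2
          by_cases hj : j = i
          · rw [hj]; exact hc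
          · exact hrun j h1 (by omega)
        · rw [runsGo_some_lt_nq cs q i s [] hr hc,
            pvRunsGo_acc cs q cs.length (i + 1) none ([] ++ [(s, i - s)]) (by omega)]
          simp only [List.nil_append, List.cons_append, List.nil_append]
          have hrec : pvScanRuns cs closer (pvRunsGo cs q (i + 1) none []) = pvFirst cs q closer (i + 1) :=
            ih (i + 1) none (by omega) (by omega)
          exact pvScan_run cs q closer hq s (i - s) (by omega)
            (by intro j h1 h2; exact hrun j h1 (by omega)) (by omega) _
            (by rw [hrec, show s + (i - s) + 1 = i + 1 by omega])
            (Or.inl (by rw [show s + (i - s) = i by omega]; exact hc))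
    · exact ih i start (by omega) hle

theorem pvAlt_entry (cs : List Char) (q : Char) (closer : Int) (hq : q ≠ '\\') :
    pvScanRuns cs closer (pvRunsGo cs q 0 none []) = pvLoopA cs q closer 2 := by
  have hb : pvScanRuns cs closer (pvRunsGo cs q 0 none []) = pvFirst cs q closer 0 :=
    pvB_main cs q closer hq cs.length 0 none (by omega) (by omega)
  rw [hb, ← pvLoopA_eq_pvFirst cs q closer cs.length 0 (by omega)]

-- ===== VERDICT (by name: the statement is the Claim_ definition above) =====
theorem try_parse_triple_quote_from_behind_py_spec : Claim_equal_try_parse_triple_quote_from_behind_py := by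
  intro line source_action _
  unfold Spec_try_parse_triple_quote_from_behind_py
  unfold try_parse_triple_quote_from_behind_py try_parse_triple_quote_from_behind_py_alt
  by_cases h9 : source_action = 9
  · rw [h9, if_pos rfl, if_pos rfl]
    exact (pvAlt_entry line.toList '\'' 13 (by decide)).symm
  · by_cases h10 : source_action = 10
    · rw [h10]
      norm_num
      exact (pvAlt_entry line.toList '"' 14 (by decide)).symm
    · rw [if_neg h9, if_neg h9, if_neg h10, if_neg h10]
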